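-- pv_equiv track=rewrite | github.com/Souvenir060/MAMA_Project | src/models/mama_full.py | _is_agent_specialty_match
-- ===== SOURCE A (Python) =====
-- from typing import Dict, List, Any, Tuple, Optional
--
-- def _is_agent_specialty_match(agent_id: str, query_data: Dict[str, Any]) -> bool:
--     """Check if agent specialty matches query type"""
--     query_text = query_data.get('query_text', '').lower()
--
--     # Specialty matching logic
--     if 'economic' in agent_id and any(word in query_text for word in ['cheap', 'budget', 'cost', 'price']):
--         return True
--     elif 'safety' in agent_id and any(word in query_text for word in ['safe', 'safety', 'reliable']):
--         return True
--     elif 'weather' in agent_id and any(word in query_text for word in ['weather', 'storm', 'clear']):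
--         return True
--     elif 'flight' in agent_id and any(word in query_text for word in ['schedule', 'time', 'departure']):
--         return True
--
--     return False  # No clear specialty match
-- ===== SOURCE B (Python) =====
-- # B: inverted index keyword->specialty, computed in two stages: first the set of
-- # specialties triggered by the query text, then a membership scan of agent_id.
-- KEYWORD_TO_SPECIALTY = {
--     'cheap': 'economic', 'budget': 'economic', 'cost': 'economic', 'price': 'economic',
--     'safe': 'safety', 'safety': 'safety', 'reliable': 'safety',
--     'weather': 'weather', 'storm': 'weather', 'clear': 'weather',
--     'schedule': 'flight', 'time': 'flight', 'departure': 'flight',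
-- }
--
-- def _is_agent_specialty_match(agent_id: str, query_data) -> bool:
--     query_text = query_data.get('query_text', '').lower()
--     matched = {spec for word, spec in KEYWORD_TO_SPECIALTY.items() if word in query_text}
--     return any(spec in agent_id for spec in matched)
-- ===== Notes on version B (the rewrite author's own statement) =====
-- stated objective: alternative
-- what changed: Replaced the per-agent if/elif dispatch by an inverted keyword-to-specialty index: B first computes the set of specialties triggered by the query text, then checks whether any triggered specialty occurs in agent_id (two staged passes instead of a fused chain).
import Mathlib
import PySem

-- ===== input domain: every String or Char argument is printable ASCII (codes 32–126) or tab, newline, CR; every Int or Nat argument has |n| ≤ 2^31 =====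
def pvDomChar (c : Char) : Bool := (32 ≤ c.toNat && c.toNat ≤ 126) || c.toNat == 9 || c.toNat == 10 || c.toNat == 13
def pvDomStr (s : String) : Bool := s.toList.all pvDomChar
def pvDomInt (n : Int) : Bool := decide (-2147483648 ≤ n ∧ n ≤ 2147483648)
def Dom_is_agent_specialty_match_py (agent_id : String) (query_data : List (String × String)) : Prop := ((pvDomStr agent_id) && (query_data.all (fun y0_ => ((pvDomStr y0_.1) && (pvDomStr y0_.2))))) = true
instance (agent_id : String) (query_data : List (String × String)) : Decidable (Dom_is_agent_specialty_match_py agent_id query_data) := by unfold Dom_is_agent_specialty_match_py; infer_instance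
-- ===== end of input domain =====

-- B replaces the if/elif dispatch by an inverted keyword->specialty index: it first computes
-- the set of specialties triggered by the query text, then scans agent_id for any of them.

-- ===== PORT A =====
def is_agent_specialty_match_py (agent_id : String) (query_data : List (String × String)) : Bool :=
  let query_text := PySem.Str.lower ((PySem.Dict.mk query_data).getD "query_text" "")
  if PySem.Str.isIn "economic" agent_id &&
      (["cheap", "budget", "cost", "price"].any (fun word => PySem.Str.isIn word query_text)) then
    true
  else if PySem.Str.isIn "safety" agent_id &&
      (["safe", "safety", "reliable"].any (fun word => PySem.Str.isIn word query_text)) then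
    true
  else if PySem.Str.isIn "weather" agent_id &&
      (["weather", "storm", "clear"].any (fun word => PySem.Str.isIn word query_text)) then
    true
  else if PySem.Str.isIn "flight" agent_id &&
      (["schedule", "time", "departure"].any (fun word => PySem.Str.isIn word query_text)) then
    true
  else
    false

-- ===== PORT B =====
-- the module-level dict, ported as an association list (type convention)
def KEYWORD_TO_SPECIALTY : List (String × String) :=
  [("cheap", "economic"), ("budget", "economic"), ("cost", "economic"), ("price", "economic"),
   ("safe", "safety"), ("safety", "safety"), ("reliable", "safety"),
   ("weather", "weather"), ("storm", "weather"), ("clear", "weather"),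
   ("schedule", "flight"), ("time", "flight"), ("departure", "flight")]

def is_agent_specialty_match_py_alt (agent_id : String) (query_data : List (String × String)) : Bool :=
  let query_text := PySem.Str.lower ((PySem.Dict.mk query_data).getD "query_text" "")
  let matched : PySem.Set String :=
    PySem.Set.ofList ((KEYWORD_TO_SPECIALTY.filter
      (fun p => PySem.Str.isIn p.1 query_text)).map (fun p => p.2))
  matched.any (fun spec => PySem.Str.isIn spec agent_id)

-- ===== PRECONDITION & SPEC =====
def Spec_is_agent_specialty_match_py (agent_id : String) (query_data : List (String × String)) (out : Bool) : Prop := out = is_agent_specialty_match_py_alt agent_id query_data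
instance (agent_id : String) (query_data : List (String × String)) (out : Bool) : Decidable (Spec_is_agent_specialty_match_py agent_id query_data out) := by unfold Spec_is_agent_specialty_match_py; infer_instance

-- ===== CLAIM (what is proved, stated in full; the proofs are below) =====
def Claim_equal_is_agent_specialty_match_py : Prop := ∀ (agent_id : String) (query_data : List (String × String)), Dom_is_agent_specialty_match_py agent_id query_data → Spec_is_agent_specialty_match_py agent_id query_data (is_agent_specialty_match_py agent_id query_data)

-- ===== LEMMAS AND PROOFS =====

-- ===== VERDICT (by name: the statement is the Claim_ definition above) =====
theorem any_ofList_eq {xs : List String} {p : String → Bool} :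
    (PySem.Set.ofList xs).any p = xs.any p := by
  rw [Bool.eq_iff_iff]
  simp [List.any_eq_true, PySem.Set.mem_ofList]

theorem if_or (c x : Bool) : (if c = true then true else x) = (c || x) := by
  cases c <;> simp

theorem is_agent_specialty_match_py_spec : Claim_equal_is_agent_specialty_match_py := by
  intro agent_id query_data _
  unfold Spec_is_agent_specialty_match_py is_agent_specialty_match_py
    is_agent_specialty_match_py_alt KEYWORD_TO_SPECIALTY
  simp only [any_ofList_eq, List.any_filter, List.any_map, Function.comp_def,
    List.any_cons, List.any_nil, Bool.or_false, if_or]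
  generalize PySem.Str.lower ((PySem.Dict.mk query_data).getD "query_text" "") = qt
  generalize PySem.Str.isIn "economic" agent_id = e
  generalize PySem.Str.isIn "safety" agent_id = s
  generalize PySem.Str.isIn "weather" agent_id = w
  generalize PySem.Str.isIn "flight" agent_id = f
  generalize PySem.Str.isIn "cheap" qt = e1
  generalize PySem.Str.isIn "budget" qt = e2
  generalize PySem.Str.isIn "cost" qt = e3
  generalize PySem.Str.isIn "price" qt = e4
  generalize PySem.Str.isIn "safe" qt = s1
  generalize PySem.Str.isIn "safety" qt = s2
  generalize PySem.Str.isIn "reliable" qt = s3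
  generalize PySem.Str.isIn "weather" qt = w1
  generalize PySem.Str.isIn "storm" qt = w2
  generalize PySem.Str.isIn "clear" qt = w3
  generalize PySem.Str.isIn "schedule" qt = f1
  generalize PySem.Str.isIn "time" qt = f2
  generalize PySem.Str.isIn "departure" qt = f3
  cases e <;> cases s <;> cases w <;> cases f <;>
    simp only [Bool.or_assoc, Bool.true_and, Bool.and_true, Bool.false_and, Bool.and_false,
      Bool.false_or, Bool.or_false]
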